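-- pv_equiv track=rewrite | github.com/A-Ahmad02/DSA_Lab | E1/E1Q5.py | min_mod_tuple
-- ===== SOURCE A (Python) =====
-- def min_mod_tuple(A,k):
--     n = len(A)
--     i_j = [(0,1)]
--     min_mod = (A[0]*A[1])%k
--
--     for i in range(0,n-1,1):
--         for j in range(i+1,n,1):
--             mod = (A[i]*A[j])%k
--             if mod < min_mod:
--                 min_mod = mod
--                 i_j = [(i,j)]
--             elif mod == min_mod and (i,j) != (0,1):
--                 i_j.append((i,j))
--
--     return i_j
-- ===== SOURCE B (Python) =====
-- def min_mod_tuple(A, k):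
--     n = len(A)
--     m = min((A[i] * A[j]) % k for i in range(n) for j in range(i + 1, n))
--     return [(i, j) for i in range(n) for j in range(i + 1, n) if (A[i] * A[j]) % k == m]
-- ===== Notes on version B (the rewrite author's own statement) =====
-- stated objective: simpler
-- what changed: B replaces A's single stateful scan (running minimum with a tie-list that is reset or appended to, plus a special-case guard for the seeded pair (0,1)) by two plain passes: compute the minimum of (A[i]*A[j])%k over all index pairs, then filter the lexicographically ordered pair list for that minimum.
import Mathlib
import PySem

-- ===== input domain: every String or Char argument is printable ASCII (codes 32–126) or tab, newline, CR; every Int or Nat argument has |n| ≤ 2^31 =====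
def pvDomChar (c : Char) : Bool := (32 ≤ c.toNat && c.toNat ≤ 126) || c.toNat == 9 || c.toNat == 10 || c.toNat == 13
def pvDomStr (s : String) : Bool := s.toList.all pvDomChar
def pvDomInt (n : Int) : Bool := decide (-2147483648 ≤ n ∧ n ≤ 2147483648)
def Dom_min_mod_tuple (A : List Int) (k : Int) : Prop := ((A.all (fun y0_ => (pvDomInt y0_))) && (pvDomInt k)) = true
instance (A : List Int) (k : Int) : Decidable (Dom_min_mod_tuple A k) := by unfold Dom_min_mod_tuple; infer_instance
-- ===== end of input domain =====

-- B replaces A's stateful running-min/tie-list scan with two plain passes (min over all pairs, then filter); same values, same O(n^2) cost.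

-- ===== PORT A =====
-- A's nested loops over range(0,n-1) / range(i+1,n), keeping a running minimum and
-- a tie-list; A[i] is PySem.List.pyGetD (indices are in range under Pre_).
def min_mod_tuple (A : List Int) (k : Int) : List (Int × Int) :=
  let n : Int := (A.length : Int)
  let st :=
    (PySem.List.pyRange 0 (n - 1) 1).foldl (fun st i =>
      (PySem.List.pyRange (i + 1) n 1).foldl (fun st j =>
        let mod := PySem.Int.mod (PySem.List.pyGetD A i 0 * PySem.List.pyGetD A j 0) k
        if mod < st.1 then (mod, [(i, j)])
        else if mod = st.1 ∧ (i, j) ≠ ((0 : Int), (1 : Int)) then (st.1, st.2 ++ [(i, j)])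
        else st) st)
      (PySem.Int.mod (PySem.List.pyGetD A 0 0 * PySem.List.pyGetD A 1 0) k,
       [((0 : Int), (1 : Int))])
  st.2

-- ===== PORT B =====
-- B builds the lexicographic pair list, takes min of the mods (min → PySem.List.min?),
-- then filters for the minimum.
def min_mod_tuple_alt (A : List Int) (k : Int) : List (Int × Int) :=
  let n : Int := (A.length : Int)
  let m := (PySem.List.min? ((PySem.List.pyRange 0 n 1).flatMap (fun i =>
      (PySem.List.pyRange (i + 1) n 1).map (fun j =>
        PySem.Int.mod (PySem.List.pyGetD A i 0 * PySem.List.pyGetD A j 0) k)))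
      (fun x => x)).getD 0
  (PySem.List.pyRange 0 n 1).flatMap (fun i =>
    ((PySem.List.pyRange (i + 1) n 1).filter (fun j =>
      decide (PySem.Int.mod (PySem.List.pyGetD A i 0 * PySem.List.pyGetD A j 0) k = m))).map
      (fun j => (i, j)))

-- ===== PRECONDITION & SPEC =====
-- Pre_ excludes exactly the inputs where the Python A raises: len(A) < 2 (IndexError on A[1])
-- and k = 0 (ZeroDivisionError on %).
def Pre_min_mod_tuple (A : List Int) (k : Int) : Prop := 2 ≤ A.length ∧ k ≠ 0
instance (A : List Int) (k : Int) : Decidable (Pre_min_mod_tuple A k) := by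
  unfold Pre_min_mod_tuple; infer_instance

def pvWitness_min_mod_tuple : List Int × Int := ([3, 4, 5, 6], 7)

def Spec_min_mod_tuple (A : List Int) (k : Int) (out : List (Int × Int)) : Prop := out = min_mod_tuple_alt A k
instance (A : List Int) (k : Int) (out : List (Int × Int)) : Decidable (Spec_min_mod_tuple A k out) := by unfold Spec_min_mod_tuple; infer_instance

-- ===== CLAIM (what is proved, stated in full; the proofs are below) =====
def Claim_equal_min_mod_tuple : Prop := ∀ (A : List Int) (k : Int), Dom_min_mod_tuple A k → Pre_min_mod_tuple A k → Spec_min_mod_tuple A k (min_mod_tuple A k)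

-- ===== LEMMAS AND PROOFS =====

-- proof-only abbreviations for the shared pieces of the two ports
def pvF (A : List Int) (k : Int) (p : Int × Int) : Int :=
  PySem.Int.mod (PySem.List.pyGetD A p.1 0 * PySem.List.pyGetD A p.2 0) k

def pvStep (A : List Int) (k : Int) (st : Int × List (Int × Int)) (p : Int × Int) :
    Int × List (Int × Int) :=
  if pvF A k p < st.1 then (pvF A k p, [p])
  else if pvF A k p = st.1 ∧ p ≠ ((0 : Int), (1 : Int)) then (st.1, st.2 ++ [p])
  else st

def pvPairs (n : Int) : List (Int × Int) :=
  (PySem.List.pyRange 0 n 1).flatMap (fun i =>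
    (PySem.List.pyRange (i + 1) n 1).map (fun j => (i, j)))

def pvRest (n : Int) : List (Int × Int) :=
  (PySem.List.pyRange 2 n 1).map (fun j => ((0 : Int), j)) ++
    (PySem.List.pyRange 1 n 1).flatMap (fun i =>
      (PySem.List.pyRange (i + 1) n 1).map (fun j => (i, j)))

-- a nested loop over i and then j is a single fold over the flattened pair list
theorem pv_nested (A : List Int) (k n : Int) :
    ∀ (l : List Int) (init : Int × List (Int × Int)),
      l.foldl (fun st i =>
          (PySem.List.pyRange (i + 1) n 1).foldl (fun st j => pvStep A k st (i, j)) st) init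
        = ((l.flatMap (fun i =>
            (PySem.List.pyRange (i + 1) n 1).map (fun j => (i, j)))).foldl (pvStep A k) init) := by
  intro l
  induction l with
  | nil => intro init; simp
  | cons a t ih =>
    intro init
    simp only [List.foldl_cons, List.flatMap_cons, List.foldl_append, List.foldl_map]
    exact ih _

-- characterisation of A's running-min/tie-list loop on a pair list avoiding (0,1)
theorem pv_fold_char (A : List Int) (k : Int) :
    ∀ (xs : List (Int × Int)) (m M : Int) (acc : List (Int × Int)),
      (∀ p ∈ xs, p ≠ ((0 : Int), (1 : Int))) →
      M = (xs.map (pvF A k)).foldl min m →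
      xs.foldl (pvStep A k) (m, acc)
        = (M, (if M = m then acc else []) ++ xs.filter (fun p => decide (pvF A k p = M))) := by
  intro xs
  induction xs with
  | nil =>
    intro m M acc _ hM
    simp at hM
    simp [hM]
  | cons p t ih =>
    intro m M acc hne hM
    have hpne : p ≠ ((0 : Int), (1 : Int)) := hne p (List.mem_cons_self ..)
    have hne' : ∀ q ∈ t, q ≠ ((0 : Int), (1 : Int)) := fun q hq => hne q (List.mem_cons_of_mem _ hq)
    have hMle : M ≤ min m (pvF A k p) := by
      rw [hM]; simp only [List.map_cons, List.foldl_cons]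
      exact (PySem.List.foldl_min_le (t.map (pvF A k)) (min m (pvF A k p))).1
    simp only [List.foldl_cons, List.filter_cons]
    by_cases h1 : pvF A k p < m
    · rw [show pvStep A k (m, acc) p = (pvF A k p, [p]) by simp [pvStep, h1]]
      have hM' : M = (t.map (pvF A k)).foldl min (pvF A k p) := by
        rw [hM]; simp only [List.map_cons, List.foldl_cons]
        congr 1; omega
      rw [ih (pvF A k p) M [p] hne' hM']
      have hMm : M ≠ m := by omega
      rw [if_neg hMm]
      by_cases h2 : pvF A k p = M
      · simp [h2]
      · simp only [h2, decide_false]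
        rw [if_neg (by omega : ¬ M = pvF A k p)]
        simp
    · by_cases h2 : pvF A k p = m
      · rw [show pvStep A k (m, acc) p = (m, acc ++ [p]) by
          simp [pvStep, h2, hpne]]
        have hM' : M = (t.map (pvF A k)).foldl min m := by
          rw [hM]; simp only [List.map_cons, List.foldl_cons]
          congr 1; omega
        rw [ih m M (acc ++ [p]) hne' hM']
        by_cases h3 : M = m
        · have h4 : pvF A k p = M := by omega
          simp [h3, h4]
        · have h4 : ¬ pvF A k p = M := by omega
          simp [h3, h4]
      · rw [show pvStep A k (m, acc) p = (m, acc) by simp [pvStep, h1, h2]]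
        have hM' : M = (t.map (pvF A k)).foldl min m := by
          rw [hM]; simp only [List.map_cons, List.foldl_cons]
          congr 1; omega
        rw [ih m M acc hne' hM']
        have h4 : ¬ pvF A k p = M := by omega
        simp [h4]

-- B's two comprehensions, rewritten over the flattened pair list pvPairs
theorem pv_alt_eq (A : List Int) (k : Int) :
    min_mod_tuple_alt A k
      = (pvPairs (A.length : Int)).filter (fun p =>
          decide (pvF A k p
            = (PySem.List.min? ((pvPairs (A.length : Int)).map (pvF A k))
                (fun x => x)).getD 0)) := by
  unfold min_mod_tuple_alt pvPairs
  simp only [List.map_flatMap, List.map_map]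
  rw [List.filter_flatMap]
  simp only [List.filter_map, Function.comp_def, pvF]
  rfl

theorem min_mod_tuple_eq (A : List Int) (k : Int) (h2 : 2 ≤ A.length) :
    min_mod_tuple A k = min_mod_tuple_alt A k := by
  have hn2 : (2 : Int) ≤ (A.length : Int) := by exact_mod_cast h2
  have hr0 : PySem.List.pyRange 0 (A.length : Int) 1
      = 0 :: PySem.List.pyRange 1 (A.length : Int) 1 :=
    PySem.List.pyRange_one_cons (by omega)
  have hr1 : PySem.List.pyRange ((0 : Int) + 1) (A.length : Int) 1
      = 1 :: PySem.List.pyRange 2 (A.length : Int) 1 := by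
    rw [show (0 : Int) + 1 = 1 by norm_num]
    exact PySem.List.pyRange_one_cons (by omega)
  have hpairs : pvPairs (A.length : Int) = ((0 : Int), (1 : Int)) :: pvRest (A.length : Int) := by
    unfold pvPairs pvRest
    rw [hr0, List.flatMap_cons, hr1, List.map_cons, List.cons_append]
  have hrestne : ∀ p ∈ pvRest (A.length : Int), p ≠ ((0 : Int), (1 : Int)) := by
    intro p hp
    unfold pvRest at hp
    rcases List.mem_append.1 hp with h | h
    · rcases List.mem_map.1 h with ⟨j, hj, rfl⟩
      have := (PySem.List.mem_pyRange_one).1 hj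
      intro hc; rw [Prod.ext_iff] at hc; simp at hc; omega
    · rcases List.mem_flatMap.1 h with ⟨i, hi, hpi⟩
      have hi' := (PySem.List.mem_pyRange_one).1 hi
      rcases List.mem_map.1 hpi with ⟨j, _, rfl⟩
      intro hc; rw [Prod.ext_iff] at hc; simp at hc; omega
  have hAfull : ((PySem.List.pyRange 0 ((A.length : Int) - 1) 1).flatMap (fun i =>
      (PySem.List.pyRange (i + 1) (A.length : Int) 1).map (fun j => (i, j))))
      = pvPairs (A.length : Int) := by
    unfold pvPairs
    have hsplit : PySem.List.pyRange 0 (A.length : Int) 1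
        = PySem.List.pyRange 0 ((A.length : Int) - 1) 1 ++ [(A.length : Int) - 1] := by
      have h := PySem.List.pyRange_one_succ_right (a := 0) (b := (A.length : Int) - 1) (by omega)
      rw [show (A.length : Int) - 1 + 1 = (A.length : Int) by ring] at h
      exact h
    rw [hsplit, List.flatMap_append]
    simp
  -- close the two ports into the helper vocabulary (definitional)
  have hA : min_mod_tuple A k
      = ((PySem.List.pyRange 0 ((A.length : Int) - 1) 1).foldl (fun st i =>
          (PySem.List.pyRange (i + 1) (A.length : Int) 1).foldl
            (fun st j => pvStep A k st (i, j)) st)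
          (pvF A k ((0 : Int), (1 : Int)), [((0 : Int), (1 : Int))])).2 := rfl
  have hB : min_mod_tuple_alt A k
      = (pvPairs (A.length : Int)).filter (fun p =>
          decide (pvF A k p
            = (PySem.List.min? ((pvPairs (A.length : Int)).map (pvF A k))
                (fun x => x)).getD 0)) := pv_alt_eq A k
  set m0 : Int := pvF A k ((0 : Int), (1 : Int)) with hm0
  set M : Int := ((pvRest (A.length : Int)).map (pvF A k)).foldl min m0 with hMdef
  have hmB : (PySem.List.min? ((pvPairs (A.length : Int)).map (pvF A k)) (fun x => x)).getD 0
      = M := by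
    rw [hpairs, List.map_cons, PySem.List.min?_id_cons, Option.getD_some]
  have hstep0 : pvStep A k (m0, [((0 : Int), (1 : Int))]) ((0 : Int), (1 : Int))
      = (m0, [((0 : Int), (1 : Int))]) := by
    unfold pvStep
    rw [if_neg (by simp [hm0]), if_neg (by intro h; exact h.2 rfl)]
  rw [hA, pv_nested, hAfull, hpairs, List.foldl_cons, hstep0,
    pv_fold_char A k (pvRest (A.length : Int)) m0 M [((0 : Int), (1 : Int))] hrestne hMdef]
  rw [hB, hmB, hpairs, List.filter_cons]
  by_cases hMm : M = m0
  · rw [if_pos hMm]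
    have hd : decide (pvF A k ((0 : Int), (1 : Int)) = M) = true := by
      simp [← hm0, hMm]
    rw [hd]
    rfl
  · rw [if_neg hMm]
    have hd : decide (pvF A k ((0 : Int), (1 : Int)) = M) = false := by
      simp [← hm0]; omega
    rw [hd]
    rfl

-- ===== VERDICT (by name: the statement is the Claim_ definition above) =====
theorem min_mod_tuple_spec : Claim_equal_min_mod_tuple := by
  intro A k _ hpre
  unfold Spec_min_mod_tuple
  exact min_mod_tuple_eq A k hpre.1
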